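-- pv_equiv track=rewrite | github.com/EMarquer/nn-morpho-analogy-iccbr | baseline/alea/alea.py | complementarite
-- ===== SOURCE A (Python) =====
-- def complementarite(m, a, r, s):
--     sol = [x for x in s]
--
--     if len(m) == 0:
--         if len(a) == 0:
--             sol.append(r)
--     else:
--         sol = complementarite(m[1:], a, r + m[0], sol)
--
--         if len(a) == 0: return sol
--
--         if m[0] == a[0]:
--             sol = complementarite(m[1:], a[1:], r, sol)
--
--     return sol
-- ===== SOURCE B (Python) =====
-- def complementarite(m, a, r, s):
--     res = list(s)
--     stack = [(m, a, r)]
--     while stack: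
--         m0, a0, r0 = stack.pop()
--         if not m0:
--             if not a0:
--                 res.append(r0)
--         else:
--             if a0 and m0[0] == a0[0]:
--                 stack.append((m0[1:], a0[1:], r0))
--             stack.append((m0[1:], a0, r0 + m0[0]))
--     return res
-- ===== Notes on version B (the rewrite author's own statement) =====
-- stated objective: alternative
-- what changed: Replaces the recursion (which also copies the accumulator list at every call) with an iterative DFS over an explicit stack of (m,a,r) states and a single result list, pushing the match branch before the skip branch so the skip branch is processed first and the enumeration order is preserved.
import Mathlib
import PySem

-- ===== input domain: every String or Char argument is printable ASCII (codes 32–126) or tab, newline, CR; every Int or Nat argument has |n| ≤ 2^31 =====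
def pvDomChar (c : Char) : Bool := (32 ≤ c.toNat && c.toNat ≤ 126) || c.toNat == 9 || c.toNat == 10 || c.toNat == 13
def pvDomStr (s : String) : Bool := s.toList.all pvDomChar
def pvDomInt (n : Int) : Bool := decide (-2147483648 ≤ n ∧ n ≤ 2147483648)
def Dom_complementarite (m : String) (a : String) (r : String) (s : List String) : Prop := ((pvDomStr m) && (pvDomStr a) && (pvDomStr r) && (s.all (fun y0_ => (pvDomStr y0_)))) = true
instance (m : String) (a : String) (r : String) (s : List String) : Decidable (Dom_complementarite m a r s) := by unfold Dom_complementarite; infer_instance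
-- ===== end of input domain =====

-- B replaces A's recursion by an iterative DFS over an explicit stack of (m,a,r) states
-- (match branch pushed before skip branch, preserving A's enumeration order); alternative decomposition, same results.


-- ===== PORT A =====
-- A's recursion, on the character lists of the strings (m[0], m[1:], r+m[0] are exact on lists)
def compA : List Char → List Char → List Char → List String → List String
  | [], a, r, sol => if a = [] then sol ++ [String.mk r] else sol
  | c :: m', a, r, s =>
      let sol := compA m' a (r ++ [c]) s
      match a with
      | [] => sol
      | a0 :: a' => if c = a0 then compA m' a' r sol else sol

def complementarite (m : String) (a : String) (r : String) (s : List String) : List String :=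
  compA m.toList a.toList r.toList s

-- ===== PORT B =====
-- B's explicit-stack DFS: pop a state; empty m emits r when a is empty; otherwise push the
-- match branch (when a nonempty and heads agree) and then the skip branch, which pops first.
def compB : List (List Char × List Char × List Char) → List String → List String
  | [], res => res
  | ([], a, r) :: st, res => compB st (if a = [] then res ++ [String.mk r] else res)
  | (c :: m', [], r) :: st, res => compB ((m', [], r ++ [c]) :: st) res
  | (c :: m', a0 :: a', r) :: st, res =>
      if c = a0 then compB ((m', a0 :: a', r ++ [c]) :: (m', a', r) :: st) res
      else compB ((m', a0 :: a', r ++ [c]) :: st) res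
termination_by st _ => (st.map (fun t => 3 ^ t.1.length)).sum
decreasing_by
  all_goals simp [List.map_cons, List.sum_cons, pow_succ]
  all_goals have h1 : 1 ≤ 3 ^ m'.length := Nat.one_le_pow _ _ (by norm_num)
  all_goals omega

def complementarite_alt (m : String) (a : String) (r : String) (s : List String) : List String :=
  compB [(m.toList, a.toList, r.toList)] s

-- ===== PRECONDITION & SPEC =====
def Spec_complementarite (m : String) (a : String) (r : String) (s : List String) (out : List String) : Prop := out = complementarite_alt m a r s
instance (m : String) (a : String) (r : String) (s : List String) (out : List String) : Decidable (Spec_complementarite m a r s out) := by unfold Spec_complementarite; infer_instance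

-- ===== CLAIM (what is proved, stated in full; the proofs are below) =====
def Claim_equal_complementarite : Prop := ∀ (m : String) (a : String) (r : String) (s : List String), Dom_complementarite m a r s → Spec_complementarite m a r s (complementarite m a r s)

-- ===== LEMMAS AND PROOFS =====
-- processing one stack state equals running A's recursion on it and keeping the rest of the stack
theorem compB_push (m : List Char) : ∀ (a r : List Char)
    (st : List (List Char × List Char × List Char)) (res : List String),
    compB ((m, a, r) :: st) res = compB st (compA m a r res) := by
  induction m with
  | nil => intro a r st res; simp [compB, compA]
  | cons c m' ih =>
    intro a r st res
    cases a with
    | nil => simp [compB, compA, ih]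
    | cons a0 a' =>
      by_cases h : c = a0 <;> simp [compB, compA, h, ih]

-- ===== VERDICT (by name: the statement is the Claim_ definition above) =====
theorem complementarite_spec : Claim_equal_complementarite := by
  intro m a r s _
  unfold Spec_complementarite complementarite complementarite_alt
  rw [compB_push]
  simp [compB]
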